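-- pv_equiv track=rewrite | github.com/Sagar5885/AI_FinancialAssistant | src/workflow/langgraph_workflow.py | extract_context_from_query
-- ===== SOURCE A (Python) =====
-- from typing import Dict, Any, Optional, List
--
-- def extract_context_from_query(query: str) -> Dict[str, Any]:
--     """Extract relevant context from user query"""
--     context = {}
--     query_lower = query.lower()
--
--     # Check for holdings/portfolio
--     if any(word in query_lower for word in ['hold', 'own', 'portfolio', 'position']):
--         context['needs_holdings'] = True
--
--     # Check for goal information
--     if any(word in query_lower for word in ['goal', 'save', 'retire', 'target']):
--         context['needs_goals'] = True
--
--     # Check for risk tolerance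
--     if any(word in query_lower for word in ['risk', 'conservative', 'aggressive', 'tolerance']):
--         context['needs_risk_profile'] = True
--
--     return context
-- ===== SOURCE B (Python) =====
-- # Position-driven scan: walk the lowercased query once and match keywords as
-- # prefixes at each position, instead of running a substring search per keyword.
-- _KEYWORDS = [
--     ("hold", "needs_holdings"), ("own", "needs_holdings"),
--     ("portfolio", "needs_holdings"), ("position", "needs_holdings"),
--     ("goal", "needs_goals"), ("save", "needs_goals"),
--     ("retire", "needs_goals"), ("target", "needs_goals"),
--     ("risk", "needs_risk_profile"), ("conservative", "needs_risk_profile"),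
--     ("aggressive", "needs_risk_profile"), ("tolerance", "needs_risk_profile"),
-- ]
--
-- def extract_context_from_query(query: str):
--     """Extract relevant context from user query (single scan over positions)."""
--     q = query.lower()
--     found = set()
--     for i in range(len(q)):
--         for word, key in _KEYWORDS:
--             if key not in found and q.startswith(word, i):
--                 found.add(key)
--     return {key: True
--             for key in ("needs_holdings", "needs_goals", "needs_risk_profile")
--             if key in found}
-- ===== Notes on version B (the rewrite author's own statement) =====
-- stated objective: alternative
-- what changed: Replaces A's per-keyword substring-containment checks with a single left-to-right scan over the positions of the lowercased query, matching keywords as prefixes at each position into a set of found categories, then emitting the dict from that set in fixed key order.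
import Mathlib
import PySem

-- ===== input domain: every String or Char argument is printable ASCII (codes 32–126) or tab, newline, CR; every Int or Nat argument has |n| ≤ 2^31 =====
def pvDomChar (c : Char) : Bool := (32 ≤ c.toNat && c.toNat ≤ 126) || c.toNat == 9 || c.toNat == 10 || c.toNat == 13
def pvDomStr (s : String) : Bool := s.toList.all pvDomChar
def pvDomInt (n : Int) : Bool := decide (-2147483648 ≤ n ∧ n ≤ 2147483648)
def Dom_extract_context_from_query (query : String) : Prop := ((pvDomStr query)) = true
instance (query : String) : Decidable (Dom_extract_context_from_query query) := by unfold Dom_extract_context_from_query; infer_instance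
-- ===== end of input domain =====

-- B replaces A's per-keyword substring searches by one position-driven scan of the lowercased
-- query that matches keywords as prefixes at each index into a set of found categories (alternative).


-- ===== PORT A =====
def extract_context_from_query (query : String) : List (String × Bool) :=
  let context : PySem.Dict String Bool := PySem.Dict.empty
  let query_lower := PySem.Str.lower query
  let context :=
    if (["hold", "own", "portfolio", "position"].any (fun w => PySem.Str.isIn w query_lower)) then
      context.insert "needs_holdings" true
    else context
  let context :=
    if (["goal", "save", "retire", "target"].any (fun w => PySem.Str.isIn w query_lower)) then
      context.insert "needs_goals" true
    else context
  let context :=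
    if (["risk", "conservative", "aggressive", "tolerance"].any (fun w => PySem.Str.isIn w query_lower)) then
      context.insert "needs_risk_profile" true
    else context
  context.items

-- ===== PORT B =====
def pvKeywords : List (String × String) :=
  [("hold", "needs_holdings"), ("own", "needs_holdings"),
   ("portfolio", "needs_holdings"), ("position", "needs_holdings"),
   ("goal", "needs_goals"), ("save", "needs_goals"),
   ("retire", "needs_goals"), ("target", "needs_goals"),
   ("risk", "needs_risk_profile"), ("conservative", "needs_risk_profile"),
   ("aggressive", "needs_risk_profile"), ("tolerance", "needs_risk_profile")]

-- inner loop of Source B at position i: try each (word, key); q.startswith(word, i) ported by hand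
-- as a prefix test on q.toList.drop i.toNat (exact: i comes from range(len(q)), so 0 ≤ i)
def pvScanAt (q : List Char) (found : PySem.Set String) (i : Int) : PySem.Set String :=
  pvKeywords.foldl
    (fun found p =>
      if !(PySem.Set.contains found p.2)
          && PySem.Chars.startswith (q.drop i.toNat) p.1.toList then
        PySem.Set.add found p.2
      else found)
    found

def extract_context_from_query_alt (query : String) : List (String × Bool) :=
  let q := PySem.Str.lower query
  let found : PySem.Set String :=
    (PySem.List.pyRange 0 (PySem.Str.len q) 1).foldl (fun found i => pvScanAt q.toList found i)
      PySem.Set.empty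
  (["needs_holdings", "needs_goals", "needs_risk_profile"].filter
      (fun key => PySem.Set.contains found key)).map (fun key => (key, true))

-- ===== PRECONDITION & SPEC =====
def Spec_extract_context_from_query (query : String) (out : List (String × Bool)) : Prop := out = extract_context_from_query_alt query
instance (query : String) (out : List (String × Bool)) : Decidable (Spec_extract_context_from_query query out) := by unfold Spec_extract_context_from_query; infer_instance

-- ===== CLAIM (what is proved, stated in full; the proofs are below) =====
def Claim_equal_extract_context_from_query : Prop := ∀ (query : String), Dom_extract_context_from_query query → Spec_extract_context_from_query query (extract_context_from_query query)

-- ===== LEMMAS AND PROOFS =====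

-- membership after Set.add
lemma pv_contains_add (s : PySem.Set String) (x y : String) :
    PySem.Set.contains (PySem.Set.add s x) y = (PySem.Set.contains s y || y == x) := by
  simp only [PySem.Set.add, PySem.Set.contains]
  split_ifs with h <;> by_cases hyx : y = x <;> simp_all

-- membership after the guarded inner fold: present before, or some pair hits
lemma pv_contains_inner (c : String × String → Bool) (L : List (String × String))
    (s : PySem.Set String) (key : String) :
    PySem.Set.contains
      (L.foldl (fun f p => if !(PySem.Set.contains f p.2) && c p then PySem.Set.add f p.2 else f) s)
      key
    = (PySem.Set.contains s key || L.any (fun p => p.2 == key && c p)) := by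
  induction L generalizing s with
  | nil => simp
  | cons p L ih =>
    simp only [List.foldl_cons, List.any_cons]
    cases hg : (!(PySem.Set.contains s p.2) && c p) with
    | false =>
      simp only [Bool.false_eq_true, if_false, ih]
      have h2 : PySem.Set.contains s p.2 = true ∨ c p = false := by
        rcases Bool.and_eq_false_iff.mp hg with h | h
        · left; revert h; cases PySem.Set.contains s p.2 <;> simp
        · right; exact h
      rcases h2 with h | h
      · by_cases hk : p.2 = key
        · subst hk; rw [h]; simp
        · have hbk : (p.2 == key) = false := by simp [hk]
          rw [hbk]; simp
      · rw [h]; simp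
    | true =>
      simp only [if_true, ih, pv_contains_add]
      have hc : c p = true := (Bool.and_eq_true_iff.mp hg).2
      have hs : PySem.Set.contains s p.2 = false := by
        have := (Bool.and_eq_true_iff.mp hg).1
        revert this; cases PySem.Set.contains s p.2 <;> simp
      rw [hc]
      by_cases hk : p.2 = key
      · subst hk; simp [Bool.or_comm]
      · have h1 : (p.2 == key) = false := by simp [hk]
        have h2 : (key == p.2) = false := by simp; intro h; exact hk h.symm
        rw [h1, h2]; simp

-- membership after the outer fold over positions
lemma pv_contains_outer (q : List Char) (is : List Int) (s : PySem.Set String) (key : String) :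
    PySem.Set.contains (is.foldl (fun f i => pvScanAt q f i) s) key
    = (PySem.Set.contains s key
        || is.any (fun i => pvKeywords.any (fun p =>
              p.2 == key && PySem.Chars.startswith (q.drop i.toNat) p.1.toList))) := by
  induction is generalizing s with
  | nil => simp
  | cons i is ih =>
    simp only [List.foldl_cons, List.any_cons]
    rw [ih]
    show (PySem.Set.contains (pvScanAt q s i) key || _) = _
    simp only [pvScanAt]
    rw [pv_contains_inner, Bool.or_assoc]

-- any distributes over || pointwise
lemma pv_any_or {α : Type} (l : List α) (f g : α → Bool) :
    l.any (fun x => f x || g x) = (l.any f || l.any g) := by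
  induction l with
  | nil => rfl
  | cons x l ih => simp only [List.any_cons, ih]; cases f x <;> cases g x <;> simp

-- scanning all positions for a nonempty word is the substring test
lemma pv_any_range_startswith (cs w : List Char) (hw : w ≠ []) :
    ((PySem.List.pyRange 0 (cs.length : Int) 1).any
        (fun i => PySem.Chars.startswith (cs.drop i.toNat) w))
    = PySem.Chars.isIn w cs := by
  have key : ((PySem.List.pyRange 0 (cs.length : Int) 1).any
        (fun i => PySem.Chars.startswith (cs.drop i.toNat) w)) = true
      ↔ PySem.Chars.isIn w cs = true := by
    rw [List.any_eq_true, ← PySem.Chars.exists_prefix_drop_iff_isIn]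
    constructor
    · rintro ⟨i, hmem, hsw⟩
      exact ⟨i.toNat, (PySem.Chars.startswith_iff _ _).mp hsw⟩
    · rintro ⟨j, hp⟩
      have hj : j < cs.length := by
        by_contra hge
        push Not at hge
        rw [List.drop_eq_nil_of_le hge] at hp
        exact hw (List.prefix_nil.mp hp)
      refine ⟨(j : Int), PySem.List.mem_pyRange_one.mpr ⟨by positivity, by exact_mod_cast hj⟩, ?_⟩
      simpa using (PySem.Chars.startswith_iff _ _).mpr (by simpa using hp)
  rcases h1 : ((PySem.List.pyRange 0 (cs.length : Int) 1).any
        (fun i => PySem.Chars.startswith (cs.drop i.toNat) w)) <;>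
    rcases h2 : PySem.Chars.isIn w cs <;> simp_all

-- ===== VERDICT (by name: the statement is the Claim_ definition above) =====
theorem extract_context_from_query_spec : Claim_equal_extract_context_from_query := by
  intro query _
  unfold Spec_extract_context_from_query extract_context_from_query extract_context_from_query_alt
  dsimp only
  have hlen : PySem.Str.len (PySem.Str.lower query) = (((PySem.Str.lower query).toList.length : Int)) := by simp
  rw [hlen]
  simp only [List.filter_cons, List.filter_nil, pv_contains_outer, pvKeywords,
    List.any_cons, List.any_nil]
  have e1 : ("needs_goals" == "needs_holdings") = false := by decide
  have e2 : ("needs_risk_profile" == "needs_holdings") = false := by decide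
  have e3 : ("needs_holdings" == "needs_goals") = false := by decide
  have e4 : ("needs_risk_profile" == "needs_goals") = false := by decide
  have e5 : ("needs_holdings" == "needs_risk_profile") = false := by decide
  have e6 : ("needs_goals" == "needs_risk_profile") = false := by decide
  simp only [e1, e2, e3, e4, e5, e6, beq_self_eq_true, Bool.true_and, Bool.false_and,
    Bool.or_false, Bool.false_or]
  simp only [pv_any_or]
  rw [pv_any_range_startswith _ _ (by decide), pv_any_range_startswith _ _ (by decide),
    pv_any_range_startswith _ _ (by decide), pv_any_range_startswith _ _ (by decide),
    pv_any_range_startswith _ _ (by decide), pv_any_range_startswith _ _ (by decide),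
    pv_any_range_startswith _ _ (by decide), pv_any_range_startswith _ _ (by decide),
    pv_any_range_startswith _ _ (by decide), pv_any_range_startswith _ _ (by decide),
    pv_any_range_startswith _ _ (by decide), pv_any_range_startswith _ _ (by decide)]
  have hec : ∀ k : String, PySem.Set.contains PySem.Set.empty k = false := fun k => rfl
  simp only [hec, Bool.false_or, PySem.Str.isIn_eq]
  split_ifs <;> rfl
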